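-- pv_equiv track=rewrite | github.com/GitMonsters/octotetrahedral-agi | arc-puzzle-catalog/arc3/agent.py | _compute_multi_color_clicks
-- ===== SOURCE A (Python) =====
-- def _compute_multi_color_clicks(target_info, group_colors, color_cycle):
--     """Compute click counts for multi-color (3+) toggle puzzles.
--
--     Uses target_info per group (single tuple or list of tuples) and color_cycle
--     to determine exact clicks needed per group.
--     """
--     n_colors = len(color_cycle)
--     if n_colors < 2:
--         return None
--
--     color_idx = {c: i for i, c in enumerate(color_cycle)}
--
--     clicks = []
--     for gi in range(len(group_colors)):
--         info = target_info[gi]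
--         if info is None:
--             clicks.append(0)
--             continue
--
--         initial = group_colors[gi]
--         init_idx = color_idx.get(initial, 0)
--
--         # Normalize to list of constraints
--         if isinstance(info, tuple):
--             constraint_list = [info]
--         else:
--             constraint_list = info
--
--         # Find which color in cycle satisfies ALL constraints
--         best_clicks = None
--         for c_offset in range(n_colors):
--             candidate_color = color_cycle[(init_idx + c_offset) % n_colors]
--             ok = True
--             for should_match, ref_color in constraint_list:
--                 if should_match and candidate_color != ref_color:
--                     ok = False
--                     break
--                 if not should_match and candidate_color == ref_color:
--                     ok = False
--                     break
--             if ok: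
--                 best_clicks = c_offset
--                 break
--
--         clicks.append(best_clicks if best_clicks is not None else 0)
--
--     return clicks
-- ===== SOURCE B (Python) =====
-- def _satisfies(color, constraint_list):
--     return all((color == ref_color) if should_match else (color != ref_color)
--                for should_match, ref_color in constraint_list)
--
--
-- def _compute_multi_color_clicks(target_info, group_colors, color_cycle):
--     """Same result via filter-then-minimize: for each group, keep the cycle
--     positions whose color meets every constraint and take the minimal cyclic
--     offset from the initial color's position (0 if no position qualifies)."""
--     n_colors = len(color_cycle)
--     if n_colors < 2:
--         return None
--
--     color_idx = {c: i for i, c in enumerate(color_cycle)}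
--
--     clicks = []
--     for gi in range(len(group_colors)):
--         info = target_info[gi]
--         if info is None:
--             clicks.append(0)
--             continue
--
--         init_idx = color_idx.get(group_colors[gi], 0)
--         constraint_list = [info] if isinstance(info, tuple) else info
--
--         clicks.append(min(((j - init_idx) % n_colors
--                            for j in range(n_colors)
--                            if _satisfies(color_cycle[j], constraint_list)),
--                           default=0))
--     return clicks
-- ===== Notes on version B (the rewrite author's own statement) =====
-- stated objective: alternative
-- what changed: Per group, the ordered first-hit scan over cyclic offsets (break on the first satisfying color) is replaced by a filter-then-minimize pass: keep all cycle positions whose color satisfies every constraint and take the minimal cyclic offset (j - init_idx) % n_colors over them, defaulting to 0.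
-- outside the precondition, e.g. on _compute_multi_color_clicks([], [1], [1, 2]): A raises IndexError, B raises IndexError
import Mathlib
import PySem

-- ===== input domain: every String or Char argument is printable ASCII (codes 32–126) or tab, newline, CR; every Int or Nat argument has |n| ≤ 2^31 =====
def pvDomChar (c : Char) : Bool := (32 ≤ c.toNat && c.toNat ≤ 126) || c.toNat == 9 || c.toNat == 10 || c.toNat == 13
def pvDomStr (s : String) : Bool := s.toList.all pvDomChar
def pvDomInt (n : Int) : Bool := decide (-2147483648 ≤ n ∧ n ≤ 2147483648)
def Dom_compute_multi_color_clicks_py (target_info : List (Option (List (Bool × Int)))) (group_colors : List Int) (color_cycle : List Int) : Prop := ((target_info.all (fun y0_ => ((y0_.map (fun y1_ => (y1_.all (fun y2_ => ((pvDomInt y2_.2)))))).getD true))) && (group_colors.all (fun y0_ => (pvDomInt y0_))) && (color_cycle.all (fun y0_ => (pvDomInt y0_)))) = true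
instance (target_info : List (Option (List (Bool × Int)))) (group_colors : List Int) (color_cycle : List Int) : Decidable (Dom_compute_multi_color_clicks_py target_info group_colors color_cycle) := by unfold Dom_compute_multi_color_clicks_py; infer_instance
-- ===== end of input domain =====

-- B replaces A's first-hit scan over cyclic offsets by a filter-then-minimize pass over
-- cycle positions (minimal cyclic offset among satisfying positions); objective: alternative.

-- ===== PORT A =====
-- color_idx = {c: i for i, c in enumerate(color_cycle)}  (shared by both Pythons verbatim)
def pvColorIdx (color_cycle : List Int) : PySem.Dict Int Int :=
  (PySem.List.enumerate color_cycle).foldl (fun d p => d.insert p.2 p.1) PySem.Dict.empty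

def compute_multi_color_clicks_py (target_info : List (Option (List (Bool × Int)))) (group_colors : List Int) (color_cycle : List Int) : Option (List Int) :=
  let n : Int := color_cycle.length
  if n < 2 then none
  else
    let color_idx := pvColorIdx color_cycle
    some ((PySem.List.pyRange 0 group_colors.length).foldl (fun acc gi =>
      -- info = target_info[gi]; index in range under Pre_
      match PySem.List.pyGetD target_info gi none with
      | none => acc ++ [(0 : Int)]
      | some constraint_list =>
        let initial := PySem.List.pyGetD group_colors gi 0
        let init_idx := color_idx.getD initial 0
        -- first c_offset in range(n) satisfying all constraints (break = List.find?)
        let best_clicks := (PySem.List.pyRange 0 n).find? (fun c_offset =>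
          let candidate_color := PySem.List.pyGetD color_cycle (PySem.Int.mod (init_idx + c_offset) n) 0
          constraint_list.all (fun p =>
            !(p.1 && !(candidate_color == p.2)) && !(!p.1 && candidate_color == p.2)))
        acc ++ [best_clicks.getD 0]) [])

-- ===== PORT B =====
def pvSatisfies (color : Int) (constraint_list : List (Bool × Int)) : Bool :=
  constraint_list.all (fun p => if p.1 then color == p.2 else color != p.2)

def compute_multi_color_clicks_py_alt (target_info : List (Option (List (Bool × Int)))) (group_colors : List Int) (color_cycle : List Int) : Option (List Int) :=
  let n : Int := color_cycle.length
  if n < 2 then none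
  else
    let color_idx := pvColorIdx color_cycle
    some ((PySem.List.pyRange 0 group_colors.length).foldl (fun acc gi =>
      match PySem.List.pyGetD target_info gi none with
      | none => acc ++ [(0 : Int)]
      | some constraint_list =>
        let init_idx := color_idx.getD (PySem.List.pyGetD group_colors gi 0) 0
        -- min(((j - init_idx) % n for j in range(n) if _satisfies(...)), default=0)
        acc ++ [PySem.List.minD
          (((PySem.List.pyRange 0 n).filter (fun j =>
              pvSatisfies (PySem.List.pyGetD color_cycle j 0) constraint_list)).map
            (fun j => PySem.Int.mod (j - init_idx) n))
          (fun x => x) 0]) [])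

-- ===== PRECONDITION & SPEC =====
-- Pre_ excludes exactly the inputs on which Python A raises IndexError:
-- target_info shorter than group_colors while len(color_cycle) ≥ 2 (B raises there too).
def Pre_compute_multi_color_clicks_py (target_info : List (Option (List (Bool × Int)))) (group_colors : List Int) (color_cycle : List Int) : Prop :=
  color_cycle.length < 2 ∨ group_colors.length ≤ target_info.length
instance (target_info : List (Option (List (Bool × Int)))) (group_colors : List Int) (color_cycle : List Int) : Decidable (Pre_compute_multi_color_clicks_py target_info group_colors color_cycle) := by unfold Pre_compute_multi_color_clicks_py; infer_instance

def pvWitness_compute_multi_color_clicks_py : (List (Option (List (Bool × Int)))) × List Int × List Int :=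
  ([some [(true, 2)], none], [1, 2], [1, 2, 3])

def Spec_compute_multi_color_clicks_py (target_info : List (Option (List (Bool × Int)))) (group_colors : List Int) (color_cycle : List Int) (out : Option (List Int)) : Prop := out = compute_multi_color_clicks_py_alt target_info group_colors color_cycle
instance (target_info : List (Option (List (Bool × Int)))) (group_colors : List Int) (color_cycle : List Int) (out : Option (List Int)) : Decidable (Spec_compute_multi_color_clicks_py target_info group_colors color_cycle out) := by unfold Spec_compute_multi_color_clicks_py; infer_instance

-- ===== CLAIM (what is proved, stated in full; the proofs are below) =====
def Claim_equal_compute_multi_color_clicks_py : Prop := ∀ (target_info : List (Option (List (Bool × Int)))) (group_colors : List Int) (color_cycle : List Int), Dom_compute_multi_color_clicks_py target_info group_colors color_cycle → Pre_compute_multi_color_clicks_py target_info group_colors color_cycle → Spec_compute_multi_color_clicks_py target_info group_colors color_cycle (compute_multi_color_clicks_py target_info group_colors color_cycle)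

-- ===== LEMMAS AND PROOFS =====

-- A's inline two-break constraint test coincides with B's helper pvSatisfies.
lemma pvSat_eq (color : Int) (cl : List (Bool × Int)) :
    (cl.all (fun p => !(p.1 && !(color == p.2)) && !(!p.1 && color == p.2)))
      = pvSatisfies color cl := by
  unfold pvSatisfies
  induction cl with
  | nil => rfl
  | cons p t ih =>
    simp only [List.all_cons, ih]
    congr 1
    rcases p with ⟨sm, rc⟩
    cases sm <;> by_cases h2 : color = rc <;> simp [h2, bne]

-- arithmetic: cyclic offset / position maps are mutually inverse modulo n
lemma pvMod_pos_round (init j n : Int) (hn : 0 < n) (h0 : 0 ≤ j) (h1 : j < n) :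
    PySem.Int.mod (init + PySem.Int.mod (j - init) n) n = j := by
  rw [PySem.Int.mod_eq_emod_of_pos hn, PySem.Int.mod_eq_emod_of_pos hn]
  rw [Int.add_emod, Int.emod_emod_of_dvd _ dvd_rfl, ← Int.add_emod]
  have : init + (j - init) = j := by ring
  rw [this, Int.emod_eq_of_lt h0 h1]

lemma pvMod_neg_round (init o n : Int) (hn : 0 < n) (h0 : 0 ≤ o) (h1 : o < n) :
    PySem.Int.mod (PySem.Int.mod (init + o) n - init) n = o := by
  rw [PySem.Int.mod_eq_emod_of_pos hn, PySem.Int.mod_eq_emod_of_pos hn]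
  rw [Int.sub_emod, Int.emod_emod_of_dvd _ dvd_rfl, ← Int.sub_emod]
  have : init + o - init = o := by ring
  rw [this, Int.emod_eq_of_lt h0 h1]

-- find? on a strictly increasing list returns the least satisfying element
lemma find?_sorted_min {l : List Int} {P : Int → Bool} {o : Int}
    (hs : l.Pairwise (· < ·)) (h : l.find? P = some o) :
    ∀ b ∈ l, P b = true → o ≤ b := by
  induction l with
  | nil => simp at h
  | cons a t ih =>
    rw [List.find?_cons] at h
    rcases List.pairwise_cons.mp hs with ⟨ha, ht⟩
    by_cases hPa : P a
    · simp [hPa] at h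
      subst h
      intro b hb _
      rcases List.mem_cons.mp hb with rfl | hbt
      · exact le_refl _
      · exact le_of_lt (ha b hbt)
    · simp [hPa] at h
      intro b hb hPb
      rcases List.mem_cons.mp hb with rfl | hbt
      · simp [hPb] at hPa
      · exact ih ht h b hbt hPb

lemma pyRange_pairwise_lt (n : Int) : (PySem.List.pyRange 0 n).Pairwise (· < ·) := by
  by_cases h : n ≤ 0
  · have he : PySem.List.pyRange 0 n = [] := by
      cases hh : PySem.List.pyRange 0 n with
      | nil => rfl
      | cons x t =>
        exfalso
        have hx : x ∈ PySem.List.pyRange 0 n := by rw [hh]; exact List.mem_cons_self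
        have := (PySem.List.mem_pyRange_one).mp hx
        omega
    rw [he]; exact List.Pairwise.nil
  · have h : 0 < n := by omega
    have : n = ((n.toNat : Nat) : Int) := by omega
    rw [this, PySem.List.pyRange_zero_natCast]
    exact List.Pairwise.map _ (fun a b hab => by exact_mod_cast hab) List.pairwise_lt_range

-- the per-group core: first-hit offset scan = minimal offset over satisfying positions
lemma pvInner (cc : List Int) (cl : List (Bool × Int)) (init : Int)
    (hn : 0 < (cc.length : Int)) :
    (((PySem.List.pyRange 0 (cc.length : Int)).find? (fun o =>
        cl.all (fun p =>
          !(p.1 && !((PySem.List.pyGetD cc (PySem.Int.mod (init + o) (cc.length : Int)) 0) == p.2))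
            && !(!p.1 && (PySem.List.pyGetD cc (PySem.Int.mod (init + o) (cc.length : Int)) 0) == p.2)))).getD 0)
    = PySem.List.minD
        (((PySem.List.pyRange 0 (cc.length : Int)).filter (fun j =>
            pvSatisfies (PySem.List.pyGetD cc j 0) cl)).map
          (fun j => PySem.Int.mod (j - init) (cc.length : Int)))
        (fun x => x) 0 := by
  set n : Int := (cc.length : Int) with hndef
  set Q : Int → Bool := fun j => pvSatisfies (PySem.List.pyGetD cc j 0) cl with hQ
  have hPQ : ∀ o : Int,
      (cl.all (fun p =>
        !(p.1 && !((PySem.List.pyGetD cc (PySem.Int.mod (init + o) n) 0) == p.2))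
          && !(!p.1 && (PySem.List.pyGetD cc (PySem.Int.mod (init + o) n) 0) == p.2)))
        = Q (PySem.Int.mod (init + o) n) := fun o => pvSat_eq _ _
  set M := ((PySem.List.pyRange 0 n).filter Q).map (fun j => PySem.Int.mod (j - init) n) with hM
  -- membership characterization of M
  have hmem : ∀ a : Int, a ∈ M ↔ (0 ≤ a ∧ a < n ∧ Q (PySem.Int.mod (init + a) n) = true) := by
    intro a
    constructor
    · intro ha
      rcases List.mem_map.mp ha with ⟨j, hjf, rfl⟩
      rcases List.mem_filter.mp hjf with ⟨hjr, hQj⟩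
      have hjb := (PySem.List.mem_pyRange_one).mp hjr
      refine ⟨PySem.Int.mod_nonneg _ hn, PySem.Int.mod_lt _ hn, ?_⟩
      rw [pvMod_pos_round init j n hn hjb.1 hjb.2]
      exact hQj
    · rintro ⟨h0, h1, hQa⟩
      apply List.mem_map.mpr
      refine ⟨PySem.Int.mod (init + a) n, ?_, ?_⟩
      · exact List.mem_filter.mpr ⟨(PySem.List.mem_pyRange_one).mpr
          ⟨PySem.Int.mod_nonneg _ hn, PySem.Int.mod_lt _ hn⟩, hQa⟩
      · exact pvMod_neg_round init a n hn h0 h1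
  -- rewrite the find? predicate
  have hfind : (PySem.List.pyRange 0 n).find? (fun o =>
      cl.all (fun p =>
        !(p.1 && !((PySem.List.pyGetD cc (PySem.Int.mod (init + o) n) 0) == p.2))
          && !(!p.1 && (PySem.List.pyGetD cc (PySem.Int.mod (init + o) n) 0) == p.2)))
      = (PySem.List.pyRange 0 n).find? (fun o => Q (PySem.Int.mod (init + o) n)) := by
    congr 1
    exact funext hPQ
  rw [hfind]
  cases hf : (PySem.List.pyRange 0 n).find? (fun o => Q (PySem.Int.mod (init + o) n)) with
  | none =>
    have hnone := List.find?_eq_none.mp hf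
    have hMnil : M = [] := by
      cases hMc : M with
      | nil => rfl
      | cons x t =>
        exfalso
        have hx : x ∈ M := by rw [hMc]; exact List.mem_cons_self
        rcases (hmem x).mp hx with ⟨h0, h1, hQx⟩
        exact hnone x ((PySem.List.mem_pyRange_one).mpr ⟨h0, h1⟩) hQx
    rw [hMnil]
    rfl
  | some o =>
    have hPo := List.find?_some hf
    have hob := (PySem.List.mem_pyRange_one).mp (List.mem_of_find?_eq_some hf)
    have homin := find?_sorted_min (pyRange_pairwise_lt n) hf
    have hoM : o ∈ M := (hmem o).mpr ⟨hob.1, hob.2, hPo⟩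
    have hMne : M ≠ [] := fun h => by rw [h] at hoM; exact absurd hoM (List.not_mem_nil)
    show o = PySem.List.minD M (fun x => x) 0
    cases hmin : PySem.List.min? M (fun x => x) with
    | none => exact absurd ((PySem.List.min?_eq_none_iff _ _).mp hmin) hMne
    | some m =>
      have hmM := PySem.List.min?_mem hmin
      rcases (hmem m).mp hmM with ⟨hm0, hm1, hQm⟩
      have h1 : o ≤ m := homin m ((PySem.List.mem_pyRange_one).mpr ⟨hm0, hm1⟩) hQm
      have h2 : m ≤ o := PySem.List.min?_isMin hmin o hoM
      have : m = o := le_antisymm h2 h1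
      simp [PySem.List.minD, hmin, this]

-- ===== VERDICT (by name: the statement is the Claim_ definition above) =====
theorem compute_multi_color_clicks_py_spec : Claim_equal_compute_multi_color_clicks_py := by
  intro target_info group_colors color_cycle _ _
  unfold Spec_compute_multi_color_clicks_py
  unfold compute_multi_color_clicks_py compute_multi_color_clicks_py_alt
  by_cases hn : (color_cycle.length : Int) < 2
  · simp [hn]
  · simp only [hn, if_false]
    congr 1
    apply PySem.List.foldl_congr_mem
    intro acc gi _
    cases hinfo : PySem.List.pyGetD target_info gi none with
    | none => rfl
    | some cl =>
      simp only []
      congr 1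
      have hpos : 0 < (color_cycle.length : Int) := by omega
      exact congrArg (fun z => [z]) (pvInner color_cycle cl
        ((pvColorIdx color_cycle).getD (PySem.List.pyGetD group_colors gi 0) 0) hpos)
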